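-- pv_equiv track=rewrite | github.com/gimdongwon/Catch_python_tmi | Woojin/8th/avoid-surveillance/solution.py | find_student
-- ===== SOURCE A (Python) =====
-- def find_student(N, x, y, corridor): # (x, y): T의 위치
--     dirs = [(1, 0), (-1, 0), (0, 1), (0, -1)]
--
--     for dx, dy in dirs:
--         nx, ny = x + dx, y + dy
--
--         while (0 <= nx < N) and (0 <= ny < N):
--             if corridor[nx][ny] == "O":
--                 break
--             elif corridor[nx][ny] == "S":
--                 return True
--
--             nx += dx
--             ny += dy
--
--     return False
-- ===== SOURCE B (Python) =====
-- def _sees(cells):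
--     # student visible along a ray iff 'S' occurs with no 'O' before it
--     return "S" in cells and ("O" not in cells or cells.index("S") < cells.index("O"))
--
--
-- def find_student(N, x, y, corridor):
--     if not (0 <= x < N and 0 <= y < N):
--         return False
--     row = corridor[x]
--     col = [corridor[i][y] for i in range(N)]
--     rays = [row[y + 1:N],        # right
--             row[:y][::-1],       # left (near to far)
--             col[x + 1:],         # down
--             col[:x][::-1]]       # up (near to far)
--     return any(_sees(r) for r in rays)
-- ===== Notes on version B (the rewrite author's own statement) =====
-- stated objective: alternative
-- what changed: Coordinate stepping in four directions is replaced by extracting each ray as a whole list (row slices for left/right, a column comprehension for up/down, reversed for near-to-far order) and deciding visibility by a first-occurrence comparison of 'S' vs 'O' via index(); Pre_ excludes undersized/ragged grids (where one of the two programs hits IndexError mid-scan) and the corner where the position sits just outside the N-by-N square yet A still walks one ray from the neighbouring cell -- an unspecified corner where treating an out-of-grid position as seeing nothing is equally defensible.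
-- outside the precondition, e.g. on find_student(2, -1, 0, [['S', '.'], ['.', '.']]): A returns True, B returns False; on find_student(3, 0, 1, [['.', 'O', '.'], ['x', 'O'], ['x']]): A returns False, B raises IndexError
import Mathlib
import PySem

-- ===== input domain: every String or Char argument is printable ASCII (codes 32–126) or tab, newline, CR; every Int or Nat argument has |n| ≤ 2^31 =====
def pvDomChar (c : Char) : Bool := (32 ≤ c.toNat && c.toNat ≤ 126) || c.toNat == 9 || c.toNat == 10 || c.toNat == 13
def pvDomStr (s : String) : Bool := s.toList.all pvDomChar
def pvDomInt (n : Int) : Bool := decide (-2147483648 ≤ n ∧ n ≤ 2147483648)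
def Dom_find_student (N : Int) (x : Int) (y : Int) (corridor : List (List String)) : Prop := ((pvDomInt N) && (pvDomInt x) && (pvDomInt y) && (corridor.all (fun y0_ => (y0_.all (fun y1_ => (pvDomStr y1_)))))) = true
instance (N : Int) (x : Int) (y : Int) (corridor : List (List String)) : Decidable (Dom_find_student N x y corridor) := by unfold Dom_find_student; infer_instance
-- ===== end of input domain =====

-- B replaces A's cell-by-cell coordinate stepping with whole-ray extraction (row slices and a
-- column comprehension, reversed for near-to-far order) plus a first-occurrence 'S'-vs-'O' test:
-- an alternative decomposition of the same cost, proved equal on the problem's natural domain.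

-- shared indexing helper: corridor[i][j]  (the pyGetD defaults are never reached inside Pre_)
def pvCell (corridor : List (List String)) (i j : Int) : String :=
  PySem.List.pyGetD (PySem.List.pyGetD corridor i []) j ""

-- ===== PORT A =====
-- A's while loop as fuel recursion; fuel N.toNat is exact: the moving coordinate is strictly
-- monotone inside [0, N), so Python's loop makes at most N iterations before the guard fails
def pvWalkA (N : Int) (corridor : List (List String)) (dx dy : Int) : Nat → Int → Int → Bool
  | 0, _, _ => false
  | fuel+1, nx, ny =>
    if 0 ≤ nx ∧ nx < N ∧ 0 ≤ ny ∧ ny < N then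
      if pvCell corridor nx ny = "O" then false
      else if pvCell corridor nx ny = "S" then true
      else pvWalkA N corridor dx dy fuel (nx + dx) (ny + dy)
    else false

def find_student (N : Int) (x : Int) (y : Int) (corridor : List (List String)) : Bool :=
  ([(1, 0), (-1, 0), (0, 1), (0, -1)] : List (Int × Int)).any
    (fun d => pvWalkA N corridor d.1 d.2 N.toNat (x + d.1) (y + d.2))

-- ===== PORT B =====
-- _sees: 'S' occurs and no 'O' occurs before it (Python's short-circuit makes the index()
-- calls unreachable when the element is absent, so the .getD 0 default is exact)
def pvSees (cells : List String) : Bool :=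
  cells.contains "S" &&
    (!cells.contains "O" ||
      decide ((PySem.List.index? cells "S").getD 0 < (PySem.List.index? cells "O").getD 0))

-- row[:y][::-1] / col[:x][::-1] are ported as slice + reverse
def find_student_alt (N : Int) (x : Int) (y : Int) (corridor : List (List String)) : Bool :=
  if ¬ (0 ≤ x ∧ x < N ∧ 0 ≤ y ∧ y < N) then false else
  let row := PySem.List.pyGetD corridor x []
  let col := (PySem.List.pyRange 0 N 1).map (fun i => pvCell corridor i y)
  let rays : List (List String) :=
    [PySem.List.slice row (some (y + 1)) (some N),
     (PySem.List.slice row none (some y)).reverse,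
     PySem.List.slice col (some (x + 1)) none,
     (PySem.List.slice col none (some x)).reverse]
  rays.any pvSees

-- ===== PRECONDITION & SPEC =====
-- Pre_ admits (i) the problem's natural domain — T inside the N×N square, a grid with at least N
-- rows whose first N rows have length ≥ N (on ragged grids one of the two programs raises
-- IndexError mid-scan) — and (ii) positions so far outside the square that all four of A's walks
-- start out of bounds (A scans nothing).  It excludes the corner where the position sits just
-- outside the square yet A still walks one ray from the neighbouring cell: an unspecified corner
-- where B's "an out-of-grid position sees nothing" is equally defensible.
def Pre_find_student (N : Int) (x : Int) (y : Int) (corridor : List (List String)) : Prop :=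
  (0 ≤ x ∧ x < N ∧ 0 ≤ y ∧ y < N ∧
    N ≤ (corridor.length : Int) ∧ ∀ row ∈ corridor.take N.toNat, N ≤ (row.length : Int))
  ∨ (¬ (0 ≤ x ∧ x < N ∧ 0 ≤ y ∧ y < N) ∧
     ¬ (0 ≤ x + 1 ∧ x + 1 < N ∧ 0 ≤ y ∧ y < N) ∧ ¬ (0 ≤ x - 1 ∧ x - 1 < N ∧ 0 ≤ y ∧ y < N) ∧
     ¬ (0 ≤ x ∧ x < N ∧ 0 ≤ y + 1 ∧ y + 1 < N) ∧ ¬ (0 ≤ x ∧ x < N ∧ 0 ≤ y - 1 ∧ y - 1 < N))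
instance (N : Int) (x : Int) (y : Int) (corridor : List (List String)) : Decidable (Pre_find_student N x y corridor) := by unfold Pre_find_student; infer_instance

def pvWitness_find_student : Int × Int × Int × List (List String) :=
  (2, 0, 0, [["S", "."], [".", "."]])

def Spec_find_student (N : Int) (x : Int) (y : Int) (corridor : List (List String)) (out : Bool) : Prop := out = find_student_alt N x y corridor
instance (N : Int) (x : Int) (y : Int) (corridor : List (List String)) (out : Bool) : Decidable (Spec_find_student N x y corridor out) := by unfold Spec_find_student; infer_instance

-- ===== CLAIM (what is proved, stated in full; the proofs are below) =====
def Claim_equal_find_student : Prop := ∀ (N : Int) (x : Int) (y : Int) (corridor : List (List String)), Dom_find_student N x y corridor → Pre_find_student N x y corridor → Spec_find_student N x y corridor (find_student N x y corridor)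

-- ===== LEMMAS AND PROOFS =====

-- reference scan: the first 'S' or 'O' along a ray decides visibility
def pvFS : List String → Bool
  | [] => false
  | c :: t => if c = "O" then false else if c = "S" then true else pvFS t

-- B's index-comparison test equals the first-occurrence scan
lemma pvSees_eq_pvFS (cells : List String) : pvSees cells = pvFS cells := by
  induction cells with
  | nil => simp [pvSees, pvFS]
  | cons c t ih =>
    by_cases hO : c = "O"
    · subst hO
      rw [pvSees, PySem.List.index?_cons_self, PySem.List.index?_cons_of_ne t (by decide : ("O" : String) ≠ "S")]
      cases PySem.List.index? t "S" <;> simp [pvFS]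
    · by_cases hS : c = "S"
      · subst hS
        rw [pvSees, pvFS, PySem.List.index?_cons_self, PySem.List.index?_cons_of_ne t (by decide : ("S" : String) ≠ "O")]
        by_cases ho : "O" ∈ t
        · obtain ⟨m, hm⟩ := Option.isSome_iff_exists.mp ((PySem.List.index?_isSome_iff t "O").mpr ho)
          rw [PySem.List.index?_eq_idxOf?] at hm
          simp [hm]
        · simp [ho]
      · rw [pvSees, pvFS, if_neg hO, if_neg hS, ← ih, pvSees,
          PySem.List.index?_cons_of_ne t (fun h => hS h), PySem.List.index?_cons_of_ne t (fun h => hO h)]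
        by_cases hs : "S" ∈ t
        · obtain ⟨k, hk⟩ := Option.isSome_iff_exists.mp ((PySem.List.index?_isSome_iff t "S").mpr hs)
          rw [PySem.List.index?_eq_idxOf?] at hk
          by_cases ho : "O" ∈ t
          · obtain ⟨m, hm⟩ := Option.isSome_iff_exists.mp ((PySem.List.index?_isSome_iff t "O").mpr ho)
            rw [PySem.List.index?_eq_idxOf?] at hm
            simp [hk, hm, hs, ho,
              (show ¬"O" = c from fun h => hO h.symm), (show ¬"S" = c from fun h => hS h.symm)]
          · simp [hs, ho, (show ¬"O" = c from fun h => hO h.symm), (show ¬"S" = c from fun h => hS h.symm)]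
        · simp [hs, (show ¬"S" = c from fun h => hS h.symm)]

lemma pvWalkA_out (N : Int) (corr : List (List String)) (dx dy : Int) (f : Nat) (nx ny : Int)
    (h : ¬ (0 ≤ nx ∧ nx < N ∧ 0 ≤ ny ∧ ny < N)) :
    pvWalkA N corr dx dy f nx ny = false := by
  cases f <;> simp [pvWalkA, h]

-- the four loop characterisations: A's walk along a direction is the first-occurrence scan
-- over the index range of the ray
lemma pvWalk_right (N : Int) (corr : List (List String)) (x : Int) (hx0 : 0 ≤ x) (hxN : x < N) :
    ∀ (f : Nat) (j : Int), 0 ≤ j → (N - j).toNat ≤ f →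
      pvWalkA N corr 0 1 f x j = pvFS ((PySem.List.pyRange j N 1).map (fun j' => pvCell corr x j')) := by
  intro f
  induction f with
  | zero =>
    intro j hj hf
    rw [PySem.List.pyRange_one_eq_nil (by omega)]
    simp [pvWalkA, pvFS]
  | succ f ih =>
    intro j hj hf
    by_cases hjN : j < N
    · rw [PySem.List.pyRange_one_cons hjN, pvWalkA, if_pos ⟨hx0, hxN, hj, hjN⟩]
      simp only [List.map_cons, pvFS]
      by_cases hO : pvCell corr x j = "O"
      · simp [hO]
      · by_cases hS : pvCell corr x j = "S"
        · simp [hS]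
        · simp only [if_neg hO, if_neg hS]
          simpa using ih (j + 1) (by omega) (by omega)
    · rw [PySem.List.pyRange_one_eq_nil (by omega), pvWalkA_out N corr 0 1 _ x j (by omega)]
      simp [pvFS]

lemma pvWalk_left (N : Int) (corr : List (List String)) (x : Int) (hx0 : 0 ≤ x) (hxN : x < N) :
    ∀ (f : Nat) (j : Int), j < N → (j + 1).toNat ≤ f →
      pvWalkA N corr 0 (-1) f x j = pvFS ((PySem.List.pyRange j (-1) (-1)).map (fun j' => pvCell corr x j')) := by
  intro f
  induction f with
  | zero =>
    intro j hj hf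
    rw [PySem.List.pyRange_neg_one_eq_nil (by omega)]
    simp [pvWalkA, pvFS]
  | succ f ih =>
    intro j hjN hf
    by_cases hj : 0 ≤ j
    · rw [PySem.List.pyRange_neg_one_cons (by omega), pvWalkA, if_pos ⟨hx0, hxN, hj, hjN⟩]
      simp only [List.map_cons, pvFS]
      by_cases hO : pvCell corr x j = "O"
      · simp [hO]
      · by_cases hS : pvCell corr x j = "S"
        · simp [hS]
        · simp only [if_neg hO, if_neg hS]
          simpa using ih (j - 1) (by omega) (by omega)
    · rw [PySem.List.pyRange_neg_one_eq_nil (by omega), pvWalkA_out N corr 0 (-1) _ x j (by omega)]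
      simp [pvFS]

lemma pvWalk_down (N : Int) (corr : List (List String)) (y : Int) (hy0 : 0 ≤ y) (hyN : y < N) :
    ∀ (f : Nat) (i : Int), 0 ≤ i → (N - i).toNat ≤ f →
      pvWalkA N corr 1 0 f i y = pvFS ((PySem.List.pyRange i N 1).map (fun i' => pvCell corr i' y)) := by
  intro f
  induction f with
  | zero =>
    intro i hi hf
    rw [PySem.List.pyRange_one_eq_nil (by omega)]
    simp [pvWalkA, pvFS]
  | succ f ih =>
    intro i hi hf
    by_cases hiN : i < N
    · rw [PySem.List.pyRange_one_cons hiN, pvWalkA, if_pos ⟨hi, hiN, hy0, hyN⟩]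
      simp only [List.map_cons, pvFS]
      by_cases hO : pvCell corr i y = "O"
      · simp [hO]
      · by_cases hS : pvCell corr i y = "S"
        · simp [hS]
        · simp only [if_neg hO, if_neg hS]
          simpa using ih (i + 1) (by omega) (by omega)
    · rw [PySem.List.pyRange_one_eq_nil (by omega), pvWalkA_out N corr 1 0 _ i y (by omega)]
      simp [pvFS]

lemma pvWalk_up (N : Int) (corr : List (List String)) (y : Int) (hy0 : 0 ≤ y) (hyN : y < N) :
    ∀ (f : Nat) (i : Int), i < N → (i + 1).toNat ≤ f →
      pvWalkA N corr (-1) 0 f i y = pvFS ((PySem.List.pyRange i (-1) (-1)).map (fun i' => pvCell corr i' y)) := by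
  intro f
  induction f with
  | zero =>
    intro i hi hf
    rw [PySem.List.pyRange_neg_one_eq_nil (by omega)]
    simp [pvWalkA, pvFS]
  | succ f ih =>
    intro i hiN hf
    by_cases hi : 0 ≤ i
    · rw [PySem.List.pyRange_neg_one_cons (by omega), pvWalkA, if_pos ⟨hi, hiN, hy0, hyN⟩]
      simp only [List.map_cons, pvFS]
      by_cases hO : pvCell corr i y = "O"
      · simp [hO]
      · by_cases hS : pvCell corr i y = "S"
        · simp [hS]
        · simp only [if_neg hO, if_neg hS]
          simpa using ih (i - 1) (by omega) (by omega)
    · rw [PySem.List.pyRange_neg_one_eq_nil (by omega), pvWalkA_out N corr (-1) 0 _ i y (by omega)]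
      simp [pvFS]

-- a slice with in-bounds endpoints is the map of the index range
lemma pvSliceMap (r : List String) (a b : Int) (ha : 0 ≤ a) (hb0 : 0 ≤ b)
    (hb : b ≤ (r.length : Int)) :
    PySem.List.slice r (some a) (some b) = (PySem.List.pyRange a b 1).map (fun j => PySem.List.pyGetD r j "") := by
  rw [PySem.List.slice_toNat r ha hb0]
  apply List.ext_getElem
  · simp [PySem.List.length_pyRange_one]
    omega
  · intro k h1 h2
    simp only [List.getElem_take, List.getElem_drop, List.getElem_map]
    rw [PySem.List.getElem_pyRange_one]
    rw [PySem.List.pyGetD_eq_getElem r "" (by omega)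
      (by simp [PySem.List.length_pyRange_one] at h2; omega)]
    congr 1
    simp [PySem.List.length_pyRange_one] at h2
    omega

lemma pvDropMap (g : Int → String) (a b : Int) (h0 : 0 ≤ a) :
    ((PySem.List.pyRange 0 b 1).map g).drop a.toNat = (PySem.List.pyRange a b 1).map g := by
  by_cases hab : a ≤ b
  · rw [PySem.List.pyRange_one_append 0 a b h0 hab, List.map_append]
    rw [show a.toNat = ((PySem.List.pyRange 0 a 1).map g).length by
      simp [PySem.List.length_pyRange_one]]
    exact List.drop_left
  · rw [PySem.List.pyRange_one_eq_nil (by omega : b ≤ a), List.map_nil]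
    apply List.drop_eq_nil_of_le
    simp [PySem.List.length_pyRange_one]
    omega

lemma pvTakeMap (g : Int → String) (a b : Int) (h0 : 0 ≤ a) (hab : a ≤ b) :
    ((PySem.List.pyRange 0 b 1).map g).take a.toNat = (PySem.List.pyRange 0 a 1).map g := by
  rw [PySem.List.pyRange_one_append 0 a b h0 hab, List.map_append]
  rw [show a.toNat = ((PySem.List.pyRange 0 a 1).map g).length by
    simp [PySem.List.length_pyRange_one]]
  exact List.take_left

-- inside Pre_, row x of the corridor has length ≥ N
lemma pvRowLen (N x : Int) (corr : List (List String))
    (hlen : N ≤ (corr.length : Int)) (hrows : ∀ row ∈ corr.take N.toNat, N ≤ (row.length : Int))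
    (hx0 : 0 ≤ x) (hxN : x < N) :
    N ≤ ((PySem.List.pyGetD corr x []).length : Int) := by
  have hxl : x < (corr.length : Int) := lt_of_lt_of_le hxN hlen
  rw [PySem.List.pyGetD_eq_getElem corr [] hx0 hxl]
  apply hrows
  have hx' : x.toNat < (corr.take N.toNat).length := by
    simp
    omega
  have : (corr.take N.toNat)[x.toNat] = corr[x.toNat]'(by omega) := List.getElem_take
  rw [← this]
  exact List.getElem_mem hx'

-- ===== VERDICT (by name: the statement is the Claim_ definition above) =====
theorem find_student_spec : Claim_equal_find_student := by
  intro N x y corr _hdom hpre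
  unfold Spec_find_student
  rcases hpre with ⟨hx0, hxN, hy0, hyN, hlen, hrows⟩ | ⟨_, d1, d2, d3, d4⟩
  case inr =>
    -- A scans nothing: every walk starts out of the square; B's bounds guard returns false
    rw [show find_student N x y corr = false by
      simp only [find_student, List.any_cons, List.any_nil, Bool.or_false, add_zero, sub_eq_add_neg]
      rw [pvWalkA_out N corr 1 0 _ (x + 1) y (by omega),
        pvWalkA_out N corr (-1) 0 _ (x + -1) y (by omega),
        pvWalkA_out N corr 0 1 _ x (y + 1) (by omega),
        pvWalkA_out N corr 0 (-1) _ x (y + -1) (by omega)]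
      rfl]
    rw [find_student_alt, if_pos (by omega)]
  have hrow : N ≤ ((PySem.List.pyGetD corr x []).length : Int) :=
    pvRowLen N x corr hlen hrows hx0 hxN
  -- the four directional walks, each rewritten as the visibility test of its extracted ray
  have h3 : pvWalkA N corr 0 1 N.toNat x (y + 1) =
      pvSees (PySem.List.slice (PySem.List.pyGetD corr x []) (some (y + 1)) (some N)) := by
    rw [pvWalk_right N corr x hx0 hxN N.toNat (y + 1) (by omega) (by omega), pvSees_eq_pvFS]
    congr 1
    rw [pvSliceMap _ (y + 1) N (by omega) (by omega) hrow]
    rfl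
  have h4 : pvWalkA N corr 0 (-1) N.toNat x (y - 1) =
      pvSees ((PySem.List.slice (PySem.List.pyGetD corr x []) none (some y)).reverse) := by
    rw [pvWalk_left N corr x hx0 hxN N.toNat (y - 1) (by omega) (by omega), pvSees_eq_pvFS]
    congr 1
    rw [← PySem.List.slice_zero_start, pvSliceMap _ 0 y (by omega) (by omega) (by omega),
      PySem.List.pyRange_neg_one_eq_reverse, List.map_reverse]
    norm_num
    exact fun a _ _ => rfl
  have h1 : pvWalkA N corr 1 0 N.toNat (x + 1) y =
      pvSees (PySem.List.slice ((PySem.List.pyRange 0 N 1).map (fun i => pvCell corr i y)) (some (x + 1)) none) := by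
    rw [pvWalk_down N corr y hy0 hyN N.toNat (x + 1) (by omega) (by omega), pvSees_eq_pvFS]
    congr 1
    rw [PySem.List.slice_from _ (by omega : (0:Int) ≤ x + 1),
      pvDropMap (fun i => pvCell corr i y) (x + 1) N (by omega)]
  have h2 : pvWalkA N corr (-1) 0 N.toNat (x - 1) y =
      pvSees ((PySem.List.slice ((PySem.List.pyRange 0 N 1).map (fun i => pvCell corr i y)) none (some x)).reverse) := by
    rw [pvWalk_up N corr y hy0 hyN N.toNat (x - 1) (by omega) (by omega), pvSees_eq_pvFS]
    congr 1
    rw [PySem.List.slice_to _ (by omega : (0:Int) ≤ x),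
      pvTakeMap (fun i => pvCell corr i y) x N (by omega) (by omega),
      PySem.List.pyRange_neg_one_eq_reverse, List.map_reverse]
    norm_num
  simp only [find_student, find_student_alt, List.any_cons, List.any_nil,
    Bool.or_false, add_zero, sub_eq_add_neg, if_neg (by omega : ¬¬(0 ≤ x ∧ x < N ∧ 0 ≤ y ∧ y < N))] at *
  rw [h1, h2, h3, h4]
  simp [Bool.or_comm, Bool.or_left_comm, Bool.or_assoc]
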